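-- pv_equiv track=rewrite | github.com/daniel-reich/turbo-robot | 6pFZZ9CdSFDGhvNBc_7.py | factor_group
-- ===== SOURCE A (Python) =====
-- def factor_group(num):
--   lst = []
--   for i in range(1,num+1):
--     if num%i == 0:
--       lst.append(i)
--   if len(lst)%2 == 0:
--     return "even"
--   else:
--     return "odd"
-- ===== SOURCE B (Python) =====
-- def factor_group(num):
--   # O(sqrt(num)): the divisor count is odd exactly when num is a perfect square.
--   if num <= 0:
--     return "even"
--   r = 0
--   while (r + 1) * (r + 1) <= num:
--     r += 1
--   return "odd" if r * r == num else "even"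
-- ===== Notes on version B (the rewrite author's own statement) =====
-- stated objective: faster
-- what changed: Replaces the O(n) divisor-enumeration loop by the classic number-theory fact that a positive integer has an odd number of divisors iff it is a perfect square, tested with an integer-square-root loop.
import Mathlib
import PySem

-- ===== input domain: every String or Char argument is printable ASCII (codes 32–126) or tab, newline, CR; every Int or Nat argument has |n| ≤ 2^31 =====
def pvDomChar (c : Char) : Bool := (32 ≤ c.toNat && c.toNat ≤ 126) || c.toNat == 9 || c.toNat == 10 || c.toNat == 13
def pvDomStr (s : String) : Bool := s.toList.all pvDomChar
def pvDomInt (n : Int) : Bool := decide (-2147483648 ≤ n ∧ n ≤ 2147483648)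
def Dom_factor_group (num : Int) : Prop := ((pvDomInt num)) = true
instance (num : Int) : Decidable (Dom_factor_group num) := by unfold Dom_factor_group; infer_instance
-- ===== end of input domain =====

-- B replaces A's O(n) divisor-enumeration loop by an O(√n) integer-square-root check:
-- a positive integer has an odd number of divisors exactly when it is a perfect square.

-- ===== PORT A =====
def factor_group (num : Int) : String :=
  let lst : List Int := (PySem.List.pyRange 1 (num + 1) 1).foldl
    (fun acc i => if PySem.Int.mod num i = 0 then acc ++ [i] else acc) []
  if lst.length % 2 = 0 then "even" else "odd"

-- ===== PORT B =====
-- 'while (r+1)*(r+1) <= num: r += 1'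
def isqrtLoop (num : Int) (r : Nat) : Nat :=
  if ((r : Int) + 1) * ((r : Int) + 1) ≤ num then isqrtLoop num (r + 1) else r
termination_by (num.toNat + 1) - r
decreasing_by
  rename_i h
  have h1 : ((r : Int) + 1) ≤ ((r : Int) + 1) * ((r : Int) + 1) := by nlinarith [Int.natCast_nonneg r]
  omega

def factor_group_alt (num : Int) : String :=
  if num ≤ 0 then "even"
  else
    let r := isqrtLoop num 0
    if (r : Int) * (r : Int) = num then "odd" else "even"

-- ===== PRECONDITION & SPEC =====
def Spec_factor_group (num : Int) (out : String) : Prop := out = factor_group_alt num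
instance (num : Int) (out : String) : Decidable (Spec_factor_group num out) := by unfold Spec_factor_group; infer_instance

-- ===== CLAIM (what is proved, stated in full; the proofs are below) =====
def Claim_equal_factor_group : Prop := ∀ (num : Int), Dom_factor_group num → Spec_factor_group num (factor_group num)

-- ===== LEMMAS AND PROOFS =====

-- exit/invariant specification of the isqrt loop
theorem isqrtLoop_spec (num : Int) (r : Nat) (h : (r : Int) * r ≤ num) :
    ((isqrtLoop num r : Int) * (isqrtLoop num r : Int) ≤ num ∧
      num < ((isqrtLoop num r : Int) + 1) * ((isqrtLoop num r : Int) + 1)) := by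
  induction r using isqrtLoop.induct num with
  | case1 r hlt ih =>
      rw [isqrtLoop, if_pos hlt]
      simpa using ih (by push_cast; linarith)
  | case2 r hlt =>
      rw [isqrtLoop, if_neg hlt]
      exact ⟨h, by omega⟩

-- the square test of B decides "∃ m, m*m = n"
theorem alt_square_iff (num : Int) (h0 : 0 < num) :
    ((isqrtLoop num 0 : Int) * (isqrtLoop num 0 : Int) = num ↔ ∃ m : ℕ, m * m = num.toNat) := by
  obtain ⟨h1, h2⟩ := isqrtLoop_spec num 0 (by simpa using h0.le)
  constructor
  · intro h
    exact ⟨isqrtLoop num 0, by omega⟩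
  · rintro ⟨m, hm⟩
    have hm' : (m : Int) * m = num := by
      rw [← Int.natCast_mul, hm, Int.toNat_of_nonneg h0.le]
    have hle : (isqrtLoop num 0 : Int) ≤ m := by nlinarith [Int.natCast_nonneg m]
    have hge : (m : Int) ≤ isqrtLoop num 0 := by nlinarith [Int.natCast_nonneg m]
    have : (m : Int) = isqrtLoop num 0 := le_antisymm hge hle
    rw [← this]; exact hm'

-- IsSquare from even exponents
theorem isSquare_of_even_factorization (n : ℕ) (hn : n ≠ 0)
    (h : ∀ p, Even (n.factorization p)) : ∃ m : ℕ, m * m = n := by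
  refine ⟨n.factorization.prod fun p k => p ^ (k / 2), ?_⟩
  simp only [Finsupp.prod]
  rw [← Finset.prod_mul_distrib]
  have : ∀ p ∈ n.factorization.support,
      p ^ (n.factorization p / 2) * p ^ (n.factorization p / 2) = p ^ n.factorization p := by
    intro p _
    rw [← pow_add]
    obtain ⟨c, hc⟩ := h p
    congr 1; omega
  rw [Finset.prod_congr rfl this]
  exact Nat.prod_factorization_pow_eq_self hn

-- a positive integer has an odd number of divisors iff it is a perfect square
theorem odd_card_divisors_iff (n : ℕ) (hn : n ≠ 0) :
    Odd n.divisors.card ↔ ∃ m : ℕ, m * m = n := by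
  rw [Nat.card_divisors hn]
  constructor
  · intro hodd
    apply isSquare_of_even_factorization n hn
    intro p
    by_cases hp : p ∈ n.primeFactors
    · rcases Nat.even_or_odd (n.factorization p) with he | ho
      · exact he
      · exfalso
        have h1 : 2 ∣ n.factorization p + 1 := by
          rw [Nat.odd_iff] at ho; omega
        have h2 : 2 ∣ ∏ q ∈ n.primeFactors, (n.factorization q + 1) :=
          h1.trans (Finset.dvd_prod_of_mem _ hp)
        rw [Nat.odd_iff] at hodd
        omega
    · rw [← Nat.support_factorization, Finsupp.mem_support_iff, not_not] at hp
      rw [hp]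
      exact ⟨0, rfl⟩
  · rintro ⟨m, hm⟩
    have hm0 : m ≠ 0 := by rintro rfl; exact hn hm.symm
    have heven : ∀ p, Even (n.factorization p) := by
      intro p
      rw [← hm, Nat.factorization_mul hm0 hm0, Finsupp.add_apply]
      exact ⟨m.factorization p, rfl⟩
    have hnd : ¬ 2 ∣ ∏ q ∈ n.primeFactors, (n.factorization q + 1) := by
      rw [(Nat.prime_two.prime).dvd_finset_prod_iff]
      rintro ⟨p, -, hdvd⟩
      obtain ⟨c, hc⟩ := heven p
      omega
    rw [Nat.odd_iff]
    omega

-- A's filtered-list length is the divisor count of num.toNat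
theorem lst_length_eq (num : Int) (h0 : 0 < num) :
    ((PySem.List.pyRange 1 (num + 1) 1).filter (fun i => decide (PySem.Int.mod num i = 0))).length
      = num.toNat.divisors.card := by
  have hn : ((num.toNat : ℕ) : Int) = num := Int.toNat_of_nonneg h0.le
  rw [PySem.List.pyRange_one]
  have he : (num + 1 - 1).toNat = num.toNat := by omega
  rw [he, List.filter_map, List.length_map, ← List.countP_eq_length_filter]
  have hc : ∀ k : ℕ, ((fun i => decide (PySem.Int.mod num i = 0)) ∘ (fun k : ℕ => (1 : Int) + k)) k
      = decide ((1 + k) ∣ num.toNat) := by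
    intro k
    simp only [Function.comp]
    rw [decide_eq_decide]
    rw [PySem.Int.mod_eq_zero_iff_dvd]
    constructor
    · intro hdvd
      have : ((1 + k : ℕ) : Int) ∣ ((num.toNat : ℕ) : Int) := by push_cast; rwa [hn]
      exact_mod_cast this
    · intro hdvd
      have : ((1 + k : ℕ) : Int) ∣ ((num.toNat : ℕ) : Int) := Int.natCast_dvd_natCast.mpr hdvd
      rw [hn] at this; push_cast at this; exact this
  have hq : List.countP ((fun i => decide (PySem.Int.mod num i = 0)) ∘ fun k : ℕ => (1 : Int) + k)
      (List.range num.toNat)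
      = List.countP (fun k => decide ((1 + k) ∣ num.toNat)) (List.range num.toNat) :=
    List.countP_congr (fun k _ => by rw [hc k])
  rw [hq]
  have hcnt : (List.range num.toNat).countP (fun k => decide ((1 + k) ∣ num.toNat))
      = ((Finset.range num.toNat).filter (fun k => (1 + k) ∣ num.toNat)).card := by
    rw [List.countP_eq_length_filter]; rfl
  rw [hcnt, Nat.divisors]
  apply Finset.card_bij (fun k _ => k + 1)
  · intro a ha
    simp only [Finset.mem_filter, Finset.mem_range] at ha
    simp only [Finset.mem_filter, Finset.mem_Ico]
    exact ⟨⟨by omega, by omega⟩, by rw [Nat.add_comm]; exact ha.2⟩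
  · intro a ha b hb hab
    omega
  · intro b hb
    simp only [Finset.mem_filter, Finset.mem_Ico] at hb
    refine ⟨b - 1, ?_, by omega⟩
    simp only [Finset.mem_filter, Finset.mem_range]
    constructor
    · omega
    · have : 1 + (b - 1) = b := by omega
      rw [this]; exact hb.2

-- ===== VERDICT (by name: the statement is the Claim_ definition above) =====
theorem factor_group_spec : Claim_equal_factor_group := by
  intro num _
  show factor_group num = factor_group_alt num
  by_cases h : num ≤ 0
  · rw [factor_group, factor_group_alt, if_pos h,
      PySem.List.pyRange_one_eq_nil (by omega)]
    simp
  · have h : 0 < num := by omega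
    have hne : ¬ num ≤ 0 := by omega
    rw [factor_group, factor_group_alt, if_neg hne]
    rw [PySem.List.foldl_append_ite_eq_filter, List.nil_append]
    have hlen := lst_length_eq num h
    have hsq := alt_square_iff num h
    have hodd := odd_card_divisors_iff num.toNat (by omega)
    rw [hlen]
    by_cases hs : (isqrtLoop num 0 : Int) * (isqrtLoop num 0 : Int) = num
    · rw [if_pos hs]
      have : Odd num.toNat.divisors.card := hodd.mpr (hsq.mp hs)
      rw [Nat.odd_iff] at this
      rw [if_neg (by omega)]
    · rw [if_neg hs]
      have : ¬ Odd num.toNat.divisors.card := fun ho => hs (hsq.mpr (hodd.mp ho))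
      rw [Nat.odd_iff] at this
      rw [if_pos (by omega)]
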